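-- pv_equiv track=rewrite | github.com/KamilDemel/LeetCode-Grind | WDI_Fundamentals/base4_digit_set_congruence.py | find_max_congruent_group
-- ===== SOURCE A (Python) =====
-- def get_base4_digit_set(number):
--     base = 4
--     digits = set()
--     if number == 0:
--         digits.add(0)
--     while number > 0:
--         remainder = number % base
--         digits.add(remainder)
--         number //= base
--     return digits
--
-- def share_same_digit_set(num1, num2):
--     return get_base4_digit_set(num1) == get_base4_digit_set(num2)
--
-- def find_max_congruent_group(arr):
--     n = len(arr)
--     max_count = 1
--
--     for i in range(n):
--         reference_num = arr[i]
--         current_group_size = 1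
--         for j in range(i + 1, n):
--             if share_same_digit_set(reference_num, arr[j]):
--                 current_group_size += 1
--
--         if current_group_size > max_count:
--             max_count = current_group_size
--
--     return max_count
-- ===== SOURCE B (Python) =====
-- def get_base4_digit_set(number):
--     base = 4
--     digits = set()
--     if number == 0:
--         digits.add(0)
--     while number > 0:
--         remainder = number % base
--         digits.add(remainder)
--         number //= base
--     return digits
--
--
-- def find_max_congruent_group(arr):
--     counts = {}
--     for x in arr:
--         k = tuple(sorted(get_base4_digit_set(x)))
--         counts[k] = counts.get(k, 0) + 1
--     return max(counts.values(), default=1)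
-- ===== Notes on version B (the rewrite author's own statement) =====
-- stated objective: faster
-- what changed: Replaced the quadratic all-pairs comparison of base-4 digit sets by a single pass that buckets each element under its canonical sorted digit-tuple in a dict and returns the largest bucket count (default 1 for the empty list).
import Mathlib
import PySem

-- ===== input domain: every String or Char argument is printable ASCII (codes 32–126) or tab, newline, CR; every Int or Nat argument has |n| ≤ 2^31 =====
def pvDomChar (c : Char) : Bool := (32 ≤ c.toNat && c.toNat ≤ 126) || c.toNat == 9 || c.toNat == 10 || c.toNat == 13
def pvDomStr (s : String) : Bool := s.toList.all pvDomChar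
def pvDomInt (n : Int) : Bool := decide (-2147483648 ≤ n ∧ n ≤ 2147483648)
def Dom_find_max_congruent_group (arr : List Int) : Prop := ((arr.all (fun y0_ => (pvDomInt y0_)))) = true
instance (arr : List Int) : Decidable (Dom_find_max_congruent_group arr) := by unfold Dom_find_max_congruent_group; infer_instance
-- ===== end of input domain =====

-- B replaces A's quadratic all-pairs digit-set comparison by one counting pass over canonical
-- sorted-digit keys (objective: faster, O(n^2)->O(n) dict-lookups aside); return value only, no mutation.


-- ===== PORT A =====
-- while number > 0: digits.add(number % 4); number //= 4
def get_base4_digit_set_loop (number : Int) (digits : PySem.Set Int) : PySem.Set Int :=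
  if 0 < number then
    get_base4_digit_set_loop (PySem.Int.floordiv number 4) (PySem.Set.add digits (PySem.Int.mod number 4))
  else digits
termination_by number.toNat
decreasing_by
  rename_i h
  rw [PySem.Int.floordiv_eq_ediv_of_pos (by norm_num : (0:Int) < 4)]
  have h1 : 4 * (number / 4) + number % 4 = number := Int.mul_ediv_add_emod number 4
  have h2 : 0 ≤ number % 4 := Int.emod_nonneg number (by norm_num)
  have h3 : number % 4 < 4 := Int.emod_lt_of_pos number (by norm_num)
  omega

def get_base4_digit_set (number : Int) : PySem.Set Int :=
  let digits : PySem.Set Int := PySem.Set.empty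
  let digits := if number = 0 then PySem.Set.add digits 0 else digits
  get_base4_digit_set_loop number digits

def share_same_digit_set (num1 num2 : Int) : Bool :=
  PySem.Set.equal (get_base4_digit_set num1) (get_base4_digit_set num2)

-- inner loop: for j in range(i+1, n): if share(...): current += 1   (iterates the tail after index i)
def fmcg_inner (reference_num : Int) (rest : List Int) (current_group_size : Int) : Int :=
  match rest with
  | [] => current_group_size
  | x :: xs =>
      fmcg_inner reference_num xs
        (if share_same_digit_set reference_num x then current_group_size + 1 else current_group_size)

-- outer loop: for i in range(n), state max_count
def fmcg_outer (rest : List Int) (max_count : Int) : Int :=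
  match rest with
  | [] => max_count
  | x :: xs =>
      let current_group_size := fmcg_inner x xs 1
      fmcg_outer xs (if current_group_size > max_count then current_group_size else max_count)

def find_max_congruent_group (arr : List Int) : Int :=
  fmcg_outer arr 1

-- ===== PORT B =====
-- k = tuple(sorted(get_base4_digit_set(x)))  — canonical key; sorted of a set is order-safe
def b4key (x : Int) : List Int :=
  PySem.List.sorted (get_base4_digit_set x) (fun d => d) false

def find_max_congruent_group_alt (arr : List Int) : Int :=
  let counts : PySem.Dict (List Int) Int :=
    arr.foldl (fun d x =>
      let k := b4key x
      d.insert k (d.getD k 0 + 1)) PySem.Dict.empty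
  PySem.List.maxD counts.values (fun v => v) 1

-- ===== PRECONDITION & SPEC =====
def Spec_find_max_congruent_group (arr : List Int) (out : Int) : Prop := out = find_max_congruent_group_alt arr
instance (arr : List Int) (out : Int) : Decidable (Spec_find_max_congruent_group arr out) := by unfold Spec_find_max_congruent_group; infer_instance

-- ===== CLAIM (what is proved, stated in full; the proofs are below) =====
def Claim_equal_find_max_congruent_group : Prop := ∀ (arr : List Int), Dom_find_max_congruent_group arr → Spec_find_max_congruent_group arr (find_max_congruent_group arr)

-- ===== LEMMAS AND PROOFS =====

theorem nodup_loop (number : Int) (digits : PySem.Set Int) (h : digits.Nodup) :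
    (get_base4_digit_set_loop number digits).Nodup := by
  fun_induction get_base4_digit_set_loop number digits with
  | case1 n d hpos ih => exact ih (PySem.Set.nodup_add d _ h)
  | case2 n d hpos => exact h
  
theorem nodup_digitset (n : Int) : (get_base4_digit_set n).Nodup := by
  unfold get_base4_digit_set
  apply nodup_loop
  split <;> simp [PySem.Set.empty, PySem.Set.add]

theorem share_iff_key_eq (a b : Int) :
    share_same_digit_set a b = true ↔ b4key a = b4key b := by
  unfold share_same_digit_set b4key
  rw [PySem.Set.equal_iff]
  constructor
  · intro h
    have hperm : (PySem.List.sorted (get_base4_digit_set b) (fun d => d) false).Perm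
        (get_base4_digit_set a) := by
      refine (PySem.List.sorted_perm _ _ _).trans ?_
      exact (List.perm_ext_iff_of_nodup (nodup_digitset b) (nodup_digitset a)).mpr
        (fun x => (h x).symm)
    have hlt : List.Pairwise (fun x y : Int => x < y)
        (PySem.List.sorted (get_base4_digit_set b) (fun d => d) false) := by
      have h1 := PySem.List.sorted_pairwise (get_base4_digit_set b) (fun d : Int => d)
      have h2 : (PySem.List.sorted (get_base4_digit_set b) (fun d => d) false).Nodup :=
        (PySem.List.sorted_perm _ _ _).nodup_iff.mpr (nodup_digitset b)
      exact (h1.and h2).imp (fun hc => lt_of_le_of_ne hc.1 hc.2)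
    exact PySem.List.sorted_eq_of_perm_of_pairwise_lt _ _ _ hperm hlt
  · intro h x
    constructor
    · intro hx
      have : x ∈ PySem.List.sorted (get_base4_digit_set a) (fun d => d) false :=
        (PySem.List.mem_sorted _ _ _ x).mpr hx
      rw [h] at this
      exact (PySem.List.mem_sorted _ _ _ x).mp this
    · intro hx
      have : x ∈ PySem.List.sorted (get_base4_digit_set b) (fun d => d) false :=
        (PySem.List.mem_sorted _ _ _ x).mpr hx
      rw [← h] at this
      exact (PySem.List.mem_sorted _ _ _ x).mp this

theorem inner_count (ref : Int) (xs : List Int) (c : Int) :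
    fmcg_inner ref xs c = c + ((xs.map b4key).count (b4key ref) : Int) := by
  induction xs generalizing c with
  | nil => simp [fmcg_inner]
  | cons x t ih =>
      simp only [fmcg_inner, ih, List.map_cons, List.count_cons]
      by_cases hs : share_same_digit_set ref x = true
      · have : b4key x = b4key ref := ((share_iff_key_eq ref x).mp hs).symm
        simp [hs, this]
        omega
      · have hne : ¬ (b4key x = b4key ref) := by
          intro he
          exact hs ((share_iff_key_eq ref x).mpr he.symm)
        simp [hs, hne]

theorem outer_max (xs : List Int) (a b : Int) :
    fmcg_outer xs (max a b) = max a (fmcg_outer xs b) := by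
  induction xs generalizing a b with
  | nil => simp [fmcg_outer]
  | cons x t ih =>
      simp only [fmcg_outer]
      have hite : ∀ m : Int, (if fmcg_inner x t 1 > m then fmcg_inner x t 1 else m)
          = max m (fmcg_inner x t 1) := by
        intro m; split <;> omega
      rw [hite, hite, max_assoc, ih]

-- recursive "best group size starting at each suffix head", on the key list
def rA : List (List Int) → Int
  | [] => 1
  | k :: t => max ((k :: t).count k : Int) (rA t)

theorem outer_eq_rA (xs : List Int) : fmcg_outer xs 1 = rA (xs.map b4key) := by
  induction xs with
  | nil => simp [fmcg_outer, rA]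
  | cons x t ih =>
      simp only [fmcg_outer, List.map_cons, rA]
      rw [inner_count]
      have hc : (1 : Int) + ((t.map b4key).count (b4key x) : Int)
          = ((b4key x :: t.map b4key).count (b4key x) : Int) := by
        simp
        omega
      rw [hc]
      have hite : (if ((b4key x :: t.map b4key).count (b4key x) : Int) > 1
            then ((b4key x :: t.map b4key).count (b4key x) : Int) else 1)
          = max ((b4key x :: t.map b4key).count (b4key x) : Int) 1 := by
        split <;> omega
      rw [hite, outer_max, ih]

theorem one_le_rA (ks : List (List Int)) : 1 ≤ rA ks := by
  induction ks with
  | nil => simp [rA]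
  | cons k t ih => simp only [rA]; omega

theorem count_le_rA (ks : List (List Int)) (k : List Int) (hk : k ∈ ks) :
    (ks.count k : Int) ≤ rA ks := by
  induction ks with
  | nil => simp at hk
  | cons h t ih =>
      simp only [rA]
      by_cases he : k = h
      · subst he; omega
      · have hkt : k ∈ t := by
          rcases List.mem_cons.mp hk with h1 | h1
          · exact absurd h1 he
          · exact h1
        have := ih hkt
        have hcc : (h :: t).count k = t.count k := by
          simp [Ne.symm he]
        rw [hcc]
        omega

theorem rA_le (ks : List (List Int)) (c : Int) (h1 : 1 ≤ c)
    (h : ∀ k ∈ ks, (ks.count k : Int) ≤ c) : rA ks ≤ c := by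
  induction ks with
  | nil => simpa [rA] using h1
  | cons hd t ih =>
      simp only [rA]
      have hhd := h hd (List.mem_cons_self ..)
      have ht : rA t ≤ c := by
        refine ih (fun k hk => ?_)
        have := h k (List.mem_cons_of_mem hd hk)
        have : ((hd :: t).count k : Int) ≤ c := this
        have hle : t.count k ≤ (hd :: t).count k := by
          simp [List.count_cons]
        omega
      omega

theorem rA_eq_maxD (ks : List (List Int)) :
    rA ks = PySem.List.maxD ((PySem.Set.ofList ks).map (fun k => (ks.count k : Int)))
      (fun v => v) 1 := by
  set vl := (PySem.Set.ofList ks).map (fun k => (ks.count k : Int)) with hvl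
  have hmem_ofList : ∀ k, k ∈ PySem.Set.ofList ks ↔ k ∈ ks := fun k =>
    PySem.Set.mem_ofList ks k
  apply le_antisymm
  · -- rA ≤ maxD
    cases hks : ks with
    | nil => simp [rA, hvl, hks, PySem.List.maxD, PySem.List.max?, PySem.Set.ofList]
    | cons k0 t0 =>
        subst hks
        have hne : vl ≠ [] := by
          have : k0 ∈ PySem.Set.ofList (k0 :: t0) := (hmem_ofList k0).mpr (List.mem_cons_self ..)
          intro hnil
          rw [hvl] at hnil
          rcases List.map_eq_nil_iff.mp hnil with h
          simp [h] at this
        obtain ⟨m, hm⟩ : ∃ m, PySem.List.max? vl (fun v => v) = some m := by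
          cases hmax : PySem.List.max? vl (fun v => v) with
          | none => exact absurd ((PySem.List.max?_eq_none_iff vl (fun v => v)).mp hmax) hne
          | some m => exact ⟨m, rfl⟩
        have hmd : PySem.List.maxD vl (fun v => v) 1 = m := by
          simp [PySem.List.maxD, hm]
        rw [hmd]
        refine rA_le _ _ ?_ ?_
        · -- 1 ≤ m : m is a count of a member key
          have hmmem := PySem.List.max?_mem hm
          rw [hvl] at hmmem
          obtain ⟨k, hk, hke⟩ := List.mem_map.mp hmmem
          have hkmem : k ∈ (k0 :: t0) := (hmem_ofList k).mp hk
          have : 0 < (k0 :: t0).count k := List.count_pos_iff.mpr hkmem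
          omega
        · intro k hk
          have hkv : ((k0 :: t0).count k : Int) ∈ vl := by
            rw [hvl]
            exact List.mem_map.mpr ⟨k, (hmem_ofList k).mpr hk, rfl⟩
          exact PySem.List.max?_isMax hm _ hkv
  · -- maxD ≤ rA
    cases hmax : PySem.List.max? vl (fun v => v) with
    | none =>
        simp only [PySem.List.maxD, hmax, Option.getD]
        exact one_le_rA ks
    | some m =>
        have hmd : PySem.List.maxD vl (fun v => v) 1 = m := by
          simp [PySem.List.maxD, hmax]
        rw [hmd]
        have hmmem := PySem.List.max?_mem hmax
        rw [hvl] at hmmem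
        obtain ⟨k, hk, hke⟩ := List.mem_map.mp hmmem
        rw [← hke]
        exact count_le_rA ks k ((hmem_ofList k).mp hk)

theorem alt_eq (arr : List Int) :
    find_max_congruent_group_alt arr
      = PySem.List.maxD (((PySem.Set.ofList (arr.map b4key)).map
          (fun k => ((arr.map b4key).count k : Int)))) (fun v => v) 1 := by
  have hfold : (arr.foldl (fun d x => d.insert (b4key x) (d.getD (b4key x) 0 + 1))
        (PySem.Dict.empty : PySem.Dict (List Int) Int))
      = PySem.Dict.counter (arr.map b4key) := by
    rw [← PySem.Dict.foldl_insert_getD_add_one_eq_counter, List.foldl_map]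
  have hvals : (PySem.Dict.counter (arr.map b4key)).values
      = (PySem.Set.ofList (arr.map b4key)).map (fun k => ((arr.map b4key).count k : Int)) := by
    show (PySem.Dict.counter (arr.map b4key)).items.map Prod.snd = _
    rw [PySem.Dict.items_counter]
    simp [List.map_map, Function.comp]
  exact (congrArg (fun d : PySem.Dict (List Int) Int =>
      PySem.List.maxD d.values (fun v => v) 1) hfold).trans
    (congrArg (fun l => PySem.List.maxD l (fun v => v) 1) hvals)

-- ===== VERDICT (by name: the statement is the Claim_ definition above) =====
theorem find_max_congruent_group_spec : Claim_equal_find_max_congruent_group := by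
  intro arr _
  show find_max_congruent_group arr = find_max_congruent_group_alt arr
  rw [alt_eq]
  unfold find_max_congruent_group
  rw [outer_eq_rA, rA_eq_maxD]
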